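-- pv_equiv track=rewrite | github.com/RishiRaj0011/Project-AI | ai_case_validator.py | generate_rejection_message
-- ===== SOURCE A (Python) =====
-- def generate_rejection_message(reasons):
--     """Generate comprehensive rejection message with CCTV-specific guidance"""
--     if not reasons:
--         return "Case requires review before approval for CCTV analysis."
--
--     message = "Your case submission needs the following improvements for accurate CCTV detection:\n\n"
--
--     # Categorize reasons
--     photo_issues = [r for r in reasons if any(word in r.lower() for word in ['photo', 'face', 'image', 'ai generated', 'clear'])]
--     form_issues = [r for r in reasons if any(word in r.lower() for word in ['name', 'location', 'details', 'information'])]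
--     consistency_issues = [r for r in reasons if 'consistency' in r.lower()]
--     other_issues = [r for r in reasons if r not in photo_issues + form_issues + consistency_issues]
--
--     issue_count = 1
--
--     if photo_issues:
--         message += "[PHOTO] **Photo Quality Issues (Critical for CCTV Matching):**\n"
--         for reason in photo_issues:
--             message += f"{issue_count}. {reason}\n"
--             issue_count += 1
--         message += "\n"
--
--     if form_issues:
--         message += "[FORM] **Form Information Issues:**\n"
--         for reason in form_issues:
--             message += f"{issue_count}. {reason}\n"
--             issue_count += 1
--         message += "\n"
--
--     if consistency_issues:
--         message += "[CONSISTENCY] **Data Consistency Issues:**\n"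
--         for reason in consistency_issues:
--             message += f"{issue_count}. {reason}\n"
--             issue_count += 1
--         message += "\n"
--
--     if other_issues:
--         message += "[OTHER] **Other Issues:**\n"
--         for reason in other_issues:
--             message += f"{issue_count}. {reason}\n"
--             issue_count += 1
--         message += "\n"
--
--     message += "[ACTION] **Please address these issues and resubmit your case.**\n\n"
--
--     message += "[TIPS] **CCTV Detection Tips:**\n"
--     message += "• Upload clear, frontal face photos (minimum 60x60 pixels face size)\n"
--     message += "• Ensure good lighting and sharp focus in photos\n"
--     message += "• Avoid AI-generated or heavily filtered images\n"
--     message += "• Include multiple angles if available\n"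
--     message += "• Provide detailed location and timing information\n\n"
--
--     message += "[INFO] **Why This Matters:** Our AI needs high-quality reference photos to accurately detect the person in CCTV footage, even when they appear small or distant in crowded scenes.\n\n"
--
--     message += "[SUPPORT] Contact support if you need assistance with photo requirements."
--
--     return message
-- ===== SOURCE B (Python) =====
-- _TAIL = (
--     "[ACTION] **Please address these issues and resubmit your case.**\n\n"
--     "[TIPS] **CCTV Detection Tips:**\n"
--     "\u2022 Upload clear, frontal face photos (minimum 60x60 pixels face size)\n"
--     "\u2022 Ensure good lighting and sharp focus in photos\n"
--     "\u2022 Avoid AI-generated or heavily filtered images\n"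
--     "\u2022 Include multiple angles if available\n"
--     "\u2022 Provide detailed location and timing information\n\n"
--     "[INFO] **Why This Matters:** Our AI needs high-quality reference photos to accurately detect the person in CCTV footage, even when they appear small or distant in crowded scenes.\n\n"
--     "[SUPPORT] Contact support if you need assistance with photo requirements."
-- )
--
-- def generate_rejection_message(reasons):
--     """Generate comprehensive rejection message with CCTV-specific guidance"""
--     if not reasons:
--         return "Case requires review before approval for CCTV analysis."
--
--     # Single pass: classify each reason into every matching bucket (independently).
--     photo, form, consistency, other = [], [], [], []
--     for r in reasons:
--         low = r.lower()
--         hit = False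
--         if any(w in low for w in ('photo', 'face', 'image', 'ai generated', 'clear')):
--             photo.append(r)
--             hit = True
--         if any(w in low for w in ('name', 'location', 'details', 'information')):
--             form.append(r)
--             hit = True
--         if 'consistency' in low:
--             consistency.append(r)
--             hit = True
--         if not hit:
--             other.append(r)
--
--     parts = ["Your case submission needs the following improvements for accurate CCTV detection:\n\n"]
--     n = 1
--     for header, bucket in (
--         ("[PHOTO] **Photo Quality Issues (Critical for CCTV Matching):**\n", photo),
--         ("[FORM] **Form Information Issues:**\n", form),
--         ("[CONSISTENCY] **Data Consistency Issues:**\n", consistency),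
--         ("[OTHER] **Other Issues:**\n", other),
--     ):
--         if bucket:
--             parts.append(header)
--             for r in bucket:
--                 parts.append(f"{n}. {r}\n")
--                 n += 1
--             parts.append("\n")
--     parts.append(_TAIL)
--     return "".join(parts)
-- ===== Notes on version B (the rewrite author's own statement) =====
-- stated objective: alternative
-- what changed: A categorizes with four separate list comprehensions (the 'other' one doing a quadratic membership test against the concatenated buckets) and renders with four copy-pasted if-blocks mutating a message string; B classifies in one pass over reasons into four buckets via independent keyword predicates with a hit flag, then renders with a single table-driven loop over (header, bucket) pairs collecting parts joined at the end.
import Mathlib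
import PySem

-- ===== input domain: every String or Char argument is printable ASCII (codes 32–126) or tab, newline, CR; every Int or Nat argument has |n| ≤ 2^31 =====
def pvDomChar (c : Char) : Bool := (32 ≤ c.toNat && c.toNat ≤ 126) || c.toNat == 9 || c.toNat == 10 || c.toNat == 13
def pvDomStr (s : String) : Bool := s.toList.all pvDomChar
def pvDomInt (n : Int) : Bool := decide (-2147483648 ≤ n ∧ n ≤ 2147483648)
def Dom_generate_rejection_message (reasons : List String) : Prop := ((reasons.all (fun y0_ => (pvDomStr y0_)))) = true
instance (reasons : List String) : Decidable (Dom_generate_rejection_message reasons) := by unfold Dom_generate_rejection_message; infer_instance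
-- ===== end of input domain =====

-- B replaces A's four comprehensions (the last doing quadratic list-membership) by one
-- classification pass into four buckets and renders them with a table-driven loop (objective: alternative).

-- shared literal text constants (pure data, used verbatim by both Pythons)
def pvEmptyMsg : String := "Case requires review before approval for CCTV analysis."
def pvHead : String := "Your case submission needs the following improvements for accurate CCTV detection:\n\n"
def pvHdrPhoto : String := "[PHOTO] **Photo Quality Issues (Critical for CCTV Matching):**\n"
def pvHdrForm : String := "[FORM] **Form Information Issues:**\n"
def pvHdrCons : String := "[CONSISTENCY] **Data Consistency Issues:**\n"
def pvHdrOther : String := "[OTHER] **Other Issues:**\n"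
def pvTail : String := "[ACTION] **Please address these issues and resubmit your case.**\n\n[TIPS] **CCTV Detection Tips:**\n• Upload clear, frontal face photos (minimum 60x60 pixels face size)\n• Ensure good lighting and sharp focus in photos\n• Avoid AI-generated or heavily filtered images\n• Include multiple angles if available\n• Provide detailed location and timing information\n\n[INFO] **Why This Matters:** Our AI needs high-quality reference photos to accurately detect the person in CCTV footage, even when they appear small or distant in crowded scenes.\n\n[SUPPORT] Contact support if you need assistance with photo requirements."

-- ===== PORT A =====
def generate_rejection_message (reasons : List String) : String :=
  if reasons.isEmpty then pvEmptyMsg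
  else
    let message := pvHead
    let photo_issues := reasons.filter (fun r =>
      (["photo", "face", "image", "ai generated", "clear"] : List String).any
        (fun word => PySem.Str.isIn word (PySem.Str.lower r)))
    let form_issues := reasons.filter (fun r =>
      (["name", "location", "details", "information"] : List String).any
        (fun word => PySem.Str.isIn word (PySem.Str.lower r)))
    let consistency_issues := reasons.filter (fun r => PySem.Str.isIn "consistency" (PySem.Str.lower r))
    let other_issues := reasons.filter
      (fun r => !((photo_issues ++ form_issues ++ consistency_issues).contains r))
    let st : String × Int := (message, 1)
    let st := if !photo_issues.isEmpty then
        let st1 := (st.1 ++ pvHdrPhoto, st.2)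
        let st2 := photo_issues.foldl
          (fun st r => (st.1 ++ PySem.Int.toStr st.2 ++ ". " ++ r ++ "\n", st.2 + 1)) st1
        (st2.1 ++ "\n", st2.2)
      else st
    let st := if !form_issues.isEmpty then
        let st1 := (st.1 ++ pvHdrForm, st.2)
        let st2 := form_issues.foldl
          (fun st r => (st.1 ++ PySem.Int.toStr st.2 ++ ". " ++ r ++ "\n", st.2 + 1)) st1
        (st2.1 ++ "\n", st2.2)
      else st
    let st := if !consistency_issues.isEmpty then
        let st1 := (st.1 ++ pvHdrCons, st.2)
        let st2 := consistency_issues.foldl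
          (fun st r => (st.1 ++ PySem.Int.toStr st.2 ++ ". " ++ r ++ "\n", st.2 + 1)) st1
        (st2.1 ++ "\n", st2.2)
      else st
    let st := if !other_issues.isEmpty then
        let st1 := (st.1 ++ pvHdrOther, st.2)
        let st2 := other_issues.foldl
          (fun st r => (st.1 ++ PySem.Int.toStr st.2 ++ ". " ++ r ++ "\n", st.2 + 1)) st1
        (st2.1 ++ "\n", st2.2)
      else st
    st.1 ++ pvTail

-- ===== PORT B =====
-- one classification step of Source B's single pass: append r to every matching bucket
def pvClassStep (acc : List String × List String × List String × List String) (r : String) :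
    List String × List String × List String × List String :=
  let low := PySem.Str.lower r
  let hp := (["photo", "face", "image", "ai generated", "clear"] : List String).any
    (fun w => PySem.Str.isIn w low)
  let hf := (["name", "location", "details", "information"] : List String).any
    (fun w => PySem.Str.isIn w low)
  let hc := PySem.Str.isIn "consistency" low
  ((if hp then acc.1 ++ [r] else acc.1),
   (if hf then acc.2.1 ++ [r] else acc.2.1),
   (if hc then acc.2.2.1 ++ [r] else acc.2.2.1),
   (if !hp && !hf && !hc then acc.2.2.2 ++ [r] else acc.2.2.2))

-- one entry of Source B's table-driven emit loop: (parts, n) updated by (header, bucket)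
def pvEmit (acc : List String × Int) (hb : String × List String) : List String × Int :=
  if hb.2.isEmpty then acc
  else
    let acc1 := (acc.1 ++ [hb.1], acc.2)
    let acc2 := hb.2.foldl
      (fun a r => (a.1 ++ [PySem.Int.toStr a.2 ++ ". " ++ r ++ "\n"], a.2 + 1)) acc1
    (acc2.1 ++ ["\n"], acc2.2)

def generate_rejection_message_alt (reasons : List String) : String :=
  if reasons.isEmpty then pvEmptyMsg
  else
    let bs := reasons.foldl pvClassStep ([], [], [], [])
    let table : List (String × List String) :=
      [(pvHdrPhoto, bs.1), (pvHdrForm, bs.2.1), (pvHdrCons, bs.2.2.1), (pvHdrOther, bs.2.2.2)]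
    let res := table.foldl pvEmit ([pvHead], (1 : Int))
    PySem.Str.join "" (res.1 ++ [pvTail])

-- ===== PRECONDITION & SPEC =====
def Spec_generate_rejection_message (reasons : List String) (out : String) : Prop := out = generate_rejection_message_alt reasons
instance (reasons : List String) (out : String) : Decidable (Spec_generate_rejection_message reasons out) := by unfold Spec_generate_rejection_message; infer_instance

-- ===== CLAIM (what is proved, stated in full; the proofs are below) =====
def Claim_equal_generate_rejection_message : Prop := ∀ (reasons : List String), Dom_generate_rejection_message reasons → Spec_generate_rejection_message reasons (generate_rejection_message reasons)

-- ===== LEMMAS AND PROOFS =====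

-- the three category predicates (proof-side abbreviations of the tests both Pythons make)
def pvP1 (r : String) : Bool :=
  (["photo", "face", "image", "ai generated", "clear"] : List String).any
    (fun w => PySem.Str.isIn w (PySem.Str.lower r))
def pvP2 (r : String) : Bool :=
  (["name", "location", "details", "information"] : List String).any
    (fun w => PySem.Str.isIn w (PySem.Str.lower r))
def pvP3 (r : String) : Bool := PySem.Str.isIn "consistency" (PySem.Str.lower r)

lemma pv_chars_join_append (l : List (List Char)) (x : List Char) :
    PySem.Chars.join [] (l ++ [x]) = PySem.Chars.join [] l ++ x := by
  induction l with
  | nil => simp [PySem.Chars.join_nil, PySem.Chars.join_singleton]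
  | cons a t ih =>
    cases t with
    | nil => simp [PySem.Chars.join_singleton, PySem.Chars.join_cons_cons]
    | cons b u =>
      simp only [List.cons_append, PySem.Chars.join_cons_cons] at *
      simp [ih]

lemma pv_join_append (ps : List String) (s : String) :
    PySem.Str.join "" (ps ++ [s]) = PySem.Str.join "" ps ++ s := by
  apply String.toList_inj.mp
  simp [PySem.Str.toList_join, String.toList_append, pv_chars_join_append]

lemma pv_join_single (s : String) : PySem.Str.join "" [s] = s := by
  apply String.toList_inj.mp
  simp [PySem.Str.toList_join, PySem.Chars.join_singleton]

lemma pvClassStep_eq (acc : List String × List String × List String × List String) (r : String) :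
    pvClassStep acc r =
      ((if pvP1 r then acc.1 ++ [r] else acc.1),
       (if pvP2 r then acc.2.1 ++ [r] else acc.2.1),
       (if pvP3 r then acc.2.2.1 ++ [r] else acc.2.2.1),
       (if !pvP1 r && !pvP2 r && !pvP3 r then acc.2.2.2 ++ [r] else acc.2.2.2)) := rfl

-- Source B's classification pass computes exactly A's four filtered lists
lemma pv_classify (xs : List String) (p f c o : List String) :
    xs.foldl pvClassStep (p, f, c, o) =
      (p ++ xs.filter pvP1, f ++ xs.filter pvP2, c ++ xs.filter pvP3,
       o ++ xs.filter (fun r => !pvP1 r && !pvP2 r && !pvP3 r)) := by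
  induction xs generalizing p f c o with
  | nil => simp
  | cons x t ih =>
    rw [List.foldl_cons, pvClassStep_eq]
    cases h1 : pvP1 x <;> cases h2 : pvP2 x <;> cases h3 : pvP3 x <;>
      simp only [List.filter_cons, h1, h2, h3, Bool.not_true, Bool.not_false, Bool.and_false,
        Bool.and_true, Bool.false_eq_true, if_true, if_false, ih, List.append_assoc,
        List.singleton_append]

-- A's quadratic "not in photo+form+consistency" test equals the pointwise predicate
lemma pv_other_eq (reasons : List String) :
    reasons.filter (fun r =>
        !((reasons.filter pvP1 ++ reasons.filter pvP2 ++ reasons.filter pvP3).contains r)) =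
      reasons.filter (fun r => !pvP1 r && !pvP2 r && !pvP3 r) := by
  apply List.filter_congr
  intro r hr
  by_cases h1 : pvP1 r <;> by_cases h2 : pvP2 r <;> by_cases h3 : pvP3 r <;>
    simp [List.mem_filter, hr, h1, h2, h3]

-- the numbered-line loops keep the invariant "A's message = join of B's parts"
lemma pv_lines_inv (bucket : List String) (msg : String) (parts : List String) (n : Int)
    (h : msg = PySem.Str.join "" parts) :
    (bucket.foldl (fun st r => (st.1 ++ PySem.Int.toStr st.2 ++ ". " ++ r ++ "\n", st.2 + 1))
        ((msg, n) : String × Int)).1 =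
      PySem.Str.join ""
        ((bucket.foldl (fun a r => (a.1 ++ [PySem.Int.toStr a.2 ++ ". " ++ r ++ "\n"], a.2 + 1))
            ((parts, n) : List String × Int)).1) ∧
    (bucket.foldl (fun st r => (st.1 ++ PySem.Int.toStr st.2 ++ ". " ++ r ++ "\n", st.2 + 1))
        ((msg, n) : String × Int)).2 =
      (bucket.foldl (fun a r => (a.1 ++ [PySem.Int.toStr a.2 ++ ". " ++ r ++ "\n"], a.2 + 1))
          ((parts, n) : List String × Int)).2 := by
  induction bucket generalizing msg parts n with
  | nil => simpa using h
  | cons x t ih =>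
    simp only [List.foldl_cons]
    apply ih
    rw [pv_join_append, h]
    simp [String.append_assoc]

-- one rendering block of A equals one pvEmit step of B under the same invariant
lemma pv_block_inv (header : String) (bucket : List String) (st : String × Int)
    (acc : List String × Int) (h1 : st.1 = PySem.Str.join "" acc.1) (h2 : st.2 = acc.2) :
    (if !bucket.isEmpty then
        let st1 := (st.1 ++ header, st.2)
        let st2 := bucket.foldl
          (fun st r => (st.1 ++ PySem.Int.toStr st.2 ++ ". " ++ r ++ "\n", st.2 + 1)) st1
        ((st2.1 ++ "\n", st2.2) : String × Int)
      else st).1 = PySem.Str.join "" ((pvEmit acc (header, bucket)).1) ∧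
    (if !bucket.isEmpty then
        let st1 := (st.1 ++ header, st.2)
        let st2 := bucket.foldl
          (fun st r => (st.1 ++ PySem.Int.toStr st.2 ++ ". " ++ r ++ "\n", st.2 + 1)) st1
        ((st2.1 ++ "\n", st2.2) : String × Int)
      else st).2 = (pvEmit acc (header, bucket)).2 := by
  obtain ⟨sm, sn⟩ := st
  obtain ⟨pl, pn⟩ := acc
  simp only at h1 h2
  subst h1 h2
  by_cases hb : bucket.isEmpty
  · simp [pvEmit, hb]
  · simp only [pvEmit, hb, Bool.not_false, if_true, if_false, Bool.false_eq_true]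
    have hinv := pv_lines_inv bucket (PySem.Str.join "" pl ++ header) (pl ++ [header]) sn
      (by rw [pv_join_append])
    exact ⟨by rw [pv_join_append, hinv.1], hinv.2⟩

-- ===== VERDICT (by name: the statement is the Claim_ definition above) =====
theorem generate_rejection_message_spec : Claim_equal_generate_rejection_message := by
  intro reasons _
  unfold Spec_generate_rejection_message generate_rejection_message generate_rejection_message_alt
  by_cases he : reasons.isEmpty
  · simp [he]
  · simp only [he, Bool.false_eq_true, if_false]
    rw [pv_classify]
    simp only [List.nil_append]
    rw [show (fun r =>
        (["photo", "face", "image", "ai generated", "clear"] : List String).any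
          (fun word => PySem.Str.isIn word (PySem.Str.lower r))) = pvP1 from rfl,
      show (fun r =>
        (["name", "location", "details", "information"] : List String).any
          (fun word => PySem.Str.isIn word (PySem.Str.lower r))) = pvP2 from rfl,
      show (fun r => PySem.Str.isIn "consistency" (PySem.Str.lower r)) = pvP3 from rfl,
      pv_other_eq]
    simp only [List.foldl_cons, List.foldl_nil]
    have h0 : (pvHead, (1 : Int)).1 = PySem.Str.join "" ([pvHead] : List String) := by
      rw [pv_join_single]
    have b1 := pv_block_inv pvHdrPhoto (reasons.filter pvP1) (pvHead, (1 : Int))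
      ([pvHead], (1 : Int)) h0 rfl
    have b2 := pv_block_inv pvHdrForm (reasons.filter pvP2) _ _ b1.1 b1.2
    have b3 := pv_block_inv pvHdrCons (reasons.filter pvP3) _ _ b2.1 b2.2
    have b4 := pv_block_inv pvHdrOther (reasons.filter fun r => !pvP1 r && !pvP2 r && !pvP3 r)
      _ _ b3.1 b3.2
    rw [pv_join_append, b4.1]
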